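-- pv_equiv track=rewrite | github.com/pinchiachen/pokemon-league | 0304.py | __build
-- ===== SOURCE A (Python) =====
-- def __build(matrix):
--     if not matrix or not matrix[0]: return
--     M = len(matrix)
--     N = len(matrix[0])
--     dp = [[0] * (N+1) for _ in range(M+1)]
--     for i in range(1, M+1):
--         for j in range(1, N+1):
--             dp[i][j] = dp[i-1][j] + dp[i][j-1] - dp[i-1][j-1] + matrix[i-1][j-1]
--     return dp
-- ===== SOURCE B (Python) =====
-- def __build(matrix):
--     if not matrix or not matrix[0]: return
--     N = len(matrix[0])
--     dp = [[0] * (N + 1)]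
--     for row in matrix:
--         prev = dp[-1]
--         cur = [0]
--         rowsum = 0
--         for j in range(N):
--             rowsum += row[j]
--             cur.append(prev[j + 1] + rowsum)
--         dp.append(cur)
--     return dp
-- ===== Notes on version B (the rewrite author's own statement) =====
-- stated objective: alternative
-- what changed: Replaces the preallocated (M+1)x(N+1) table with four-term inclusion-exclusion dp[i-1][j]+dp[i][j-1]-dp[i-1][j-1] by growing the bordered table row by row: each new row is built by appending prev[j+1]+rowsum with a running row-prefix accumulator, eliminating the subtraction, the index-based double loop and the upfront zero table.
import Mathlib
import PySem

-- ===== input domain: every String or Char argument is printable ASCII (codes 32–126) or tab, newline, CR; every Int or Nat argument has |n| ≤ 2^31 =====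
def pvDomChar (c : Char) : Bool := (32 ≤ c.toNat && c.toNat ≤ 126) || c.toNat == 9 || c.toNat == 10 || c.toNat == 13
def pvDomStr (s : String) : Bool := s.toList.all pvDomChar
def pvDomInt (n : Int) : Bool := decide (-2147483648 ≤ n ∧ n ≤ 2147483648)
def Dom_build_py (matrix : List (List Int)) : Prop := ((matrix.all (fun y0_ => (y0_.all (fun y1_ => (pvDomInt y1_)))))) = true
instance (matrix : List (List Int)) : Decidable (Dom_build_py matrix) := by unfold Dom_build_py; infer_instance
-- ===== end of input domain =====

-- B builds the bordered prefix-sum table row by row with a running row accumulator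
-- instead of A's preallocated table and four-term inclusion-exclusion; same values, proved equal.

-- ===== PORT A =====
-- 2D read with default 0 and 2D write; exact on Pre_ (all indices A uses are in range)
def pvGet2 (d : List (List Int)) (i j : Nat) : Int := (d.getD i []).getD j 0
def pvSet2 (d : List (List Int)) (i j : Nat) (v : Int) : List (List Int) :=
  d.set i ((d.getD i []).set j v)

-- literal transliteration of A: guard, zero table, nested index loops (range(1,M+1) = List.range' 1 M)
def build_py (matrix : List (List Int)) : Option (List (List Int)) :=
  if matrix = [] ∨ matrix.headD [] = [] then none
  else
    let M := matrix.length
    let N := (matrix.headD []).length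
    let dp0 := List.replicate (M+1) (List.replicate (N+1) (0:Int))
    let dp := (List.range' 1 M).foldl (fun dp i =>
      (List.range' 1 N).foldl (fun dp j =>
        pvSet2 dp i j (pvGet2 dp (i-1) j + pvGet2 dp i (j-1) - pvGet2 dp (i-1) (j-1)
          + pvGet2 matrix (i-1) (j-1))) dp) dp0
    some dp

-- ===== PORT B =====
-- one new row from the previous row and a matrix row, via a running row-prefix sum
def pvRowB (prev row : List Int) (N : Nat) : List Int :=
  ((List.range N).foldl (fun (st : List Int × Int) j =>
      let rowsum := st.2 + row.getD j 0
      (st.1 ++ [prev.getD (j+1) 0 + rowsum], rowsum)) ([0], 0)).1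

def build_py_alt (matrix : List (List Int)) : Option (List (List Int)) :=
  if matrix = [] ∨ matrix.headD [] = [] then none
  else
    let N := (matrix.headD []).length
    some (matrix.foldl (fun dp row => dp ++ [pvRowB (dp.getLastD []) row N])
      [List.replicate (N+1) (0:Int)])

-- ===== PRECONDITION & SPEC =====
-- Pre_ excludes ragged matrices whose later rows are shorter than the first row,
-- on which A raises IndexError reading matrix[i-1][j-1].
def Pre_build_py (matrix : List (List Int)) : Prop :=
  ∀ row ∈ matrix, (matrix.headD []).length ≤ row.length
instance (matrix : List (List Int)) : Decidable (Pre_build_py matrix) := by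
  unfold Pre_build_py; infer_instance

def pvWitness_build_py : List (List Int) := [[1, 2], [3, 4]]

def Spec_build_py (matrix : List (List Int)) (out : Option (List (List Int))) : Prop := out = build_py_alt matrix
instance (matrix : List (List Int)) (out : Option (List (List Int))) : Decidable (Spec_build_py matrix out) := by unfold Spec_build_py; infer_instance

-- ===== CLAIM (what is proved, stated in full; the proofs are below) =====
def Claim_equal_build_py : Prop := ∀ (matrix : List (List Int)), Dom_build_py matrix → Pre_build_py matrix → Spec_build_py matrix (build_py matrix)

-- ===== LEMMAS AND PROOFS =====

-- closed form of one produced row: entry j+1 is prev[j+1] plus the prefix sum of m up to j+1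
def pvRowSpec (prev m : List Int) (N : Nat) : List Int :=
  0 :: (List.range N).map (fun k => prev.getD (k+1) 0 + ((m.take (k+1)).sum))

theorem pv_sum_take_succ (m : List Int) (t : Nat) :
    ((m.take (t+1)).sum) = (m.take t).sum + m.getD t 0 := by
  rcases h : m[t]? with _ | v <;>
    simp [List.take_add_one, h, List.getD]

theorem pv_rowB_aux (prev m : List Int) (t : Nat) :
    ((List.range t).foldl (fun (st : List Int × Int) j =>
      let rowsum := st.2 + m.getD j 0
      (st.1 ++ [prev.getD (j+1) 0 + rowsum], rowsum)) ([0], 0))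
    = (pvRowSpec prev m t, (m.take t).sum) := by
  induction t with
  | zero => simp [pvRowSpec]
  | succ t ih =>
    rw [List.range_succ, List.foldl_append, ih]
    simp [pvRowSpec, List.range_succ, pv_sum_take_succ]

theorem pv_rowB_eq (prev m : List Int) (N : Nat) :
    pvRowB prev m N = pvRowSpec prev m N := by
  unfold pvRowB
  rw [pv_rowB_aux]

def pvRowAfold (prev m : List Int) (cur : List Int) (js : List Nat) : List Int :=
  js.foldl (fun cur j =>
    cur.set j (prev.getD j 0 + cur.getD (j-1) 0 - prev.getD (j-1) 0 + m.getD (j-1) 0)) cur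

theorem pv_getD2_set_self (l : List (List Int)) (i : Nat) (v : List Int)
    (h : i < l.length) : (l.set i v).getD i [] = v := by
  simp [List.getD, h]

theorem pv_getD2_set_ne (l : List (List Int)) (i i' : Nat) (v : List Int)
    (h : i' ≠ i) : (l.set i v).getD i' [] = l.getD i' [] := by
  simp [List.getD, List.getElem?_set_ne h.symm]

theorem pv_set_getD (l : List (List Int)) (i : Nat) (h : i < l.length) :
    l.set i (l.getD i []) = l := by
  apply List.ext_getElem
  · simp
  · intro n h1 h2
    rcases eq_or_ne n i with rfl | hne
    · simp [List.getElem?_eq_getElem h]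
    · simp [List.getElem_set_ne hne.symm]

theorem pv_inner_eq (matrix : List (List Int)) (js : List Nat) :
    ∀ (dp : List (List Int)) (i : Nat), 1 ≤ i → i < dp.length →
    (js.foldl (fun dp j =>
        pvSet2 dp i j (pvGet2 dp (i-1) j + pvGet2 dp i (j-1) - pvGet2 dp (i-1) (j-1)
          + pvGet2 matrix (i-1) (j-1))) dp)
    = dp.set i (pvRowAfold (dp.getD (i-1) []) (matrix.getD (i-1) []) (dp.getD i []) js) := by
  induction js with
  | nil =>
    intro dp i h1 h2
    simp only [List.foldl_nil, pvRowAfold]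
    exact (pv_set_getD dp i h2).symm
  | cons j js ih =>
    intro dp i h1 h2
    have hne : i - 1 ≠ i := by omega
    set v : Int := pvGet2 dp (i-1) j + pvGet2 dp i (j-1) - pvGet2 dp (i-1) (j-1)
          + pvGet2 matrix (i-1) (j-1) with hv
    have hstep : (List.foldl (fun dp j =>
        pvSet2 dp i j (pvGet2 dp (i-1) j + pvGet2 dp i (j-1) - pvGet2 dp (i-1) (j-1)
          + pvGet2 matrix (i-1) (j-1))) dp (j :: js))
        = (List.foldl (fun dp j =>
        pvSet2 dp i j (pvGet2 dp (i-1) j + pvGet2 dp i (j-1) - pvGet2 dp (i-1) (j-1)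
          + pvGet2 matrix (i-1) (j-1))) (pvSet2 dp i j v) js) := rfl
    rw [hstep, ih (pvSet2 dp i j v) i h1 (by simp [pvSet2, h2])]
    unfold pvSet2
    rw [List.set_set,
        pv_getD2_set_ne dp i (i-1) _ hne,
        pv_getD2_set_self dp i _ h2]
    have hfold : pvRowAfold (dp.getD (i-1) []) (matrix.getD (i-1) []) (dp.getD i []) (j :: js)
        = pvRowAfold (dp.getD (i-1) []) (matrix.getD (i-1) [])
            ((dp.getD i []).set j v) js := by
      simp only [pvRowAfold, List.foldl_cons, hv, pvGet2]
    rw [hfold]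

theorem pv_rowA_eq (prev m : List Int) (N t : Nat) (ht : t ≤ N)
    (h0 : prev.getD 0 0 = 0) :
    pvRowAfold prev m (List.replicate (N+1) 0) (List.range' 1 t)
    = (0 :: (List.range t).map (fun k => prev.getD (k+1) 0 + ((m.take (k+1)).sum)))
        ++ List.replicate (N - t) 0 := by
  induction t with
  | zero => simp [pvRowAfold, List.replicate_succ]
  | succ t ih =>
    have ht' : t ≤ N := by omega
    have hsplit : pvRowAfold prev m (List.replicate (N+1) 0) (List.range' 1 (t+1))
        = pvRowAfold prev m (pvRowAfold prev m (List.replicate (N+1) 0) (List.range' 1 t))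
            [1 + 1 * t] := by
      rw [List.range'_concat]
      simp only [pvRowAfold, List.foldl_append]
    rw [hsplit, ih ht']
    have hj : 1 + 1 * t = t + 1 := by omega
    have hrep : N - t = (N - (t+1)) + 1 := by omega
    have hg : (((0:Int) :: (List.range t).map
          (fun k => prev.getD (k+1) 0 + ((m.take (k+1)).sum)))
        ++ List.replicate (N - t) 0).getD t 0
        = if t = 0 then 0 else prev.getD t 0 + (m.take t).sum := by
      rw [List.getD_append _ _ _ _ (by simp)]
      cases t with
      | zero => simp
      | succ s =>
        rw [List.getD_cons_succ]
        simp [List.getD]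
    simp only [pvRowAfold, List.foldl_cons, List.foldl_nil, hj, Nat.add_sub_cancel]
    rw [hg, List.set_append_right _ _ (by simp), hrep, List.replicate_succ]
    simp only [List.length_cons, List.length_map, List.length_range,
      Nat.sub_self, List.set_cons_zero]
    rw [List.range_succ, List.map_append]
    simp only [List.cons_append, List.append_assoc,
      List.map_cons, List.map_nil, List.nil_append]
    congr 2
    rcases Nat.eq_zero_or_pos t with rfl | htpos
    · rw [pv_sum_take_succ]
      simp [List.getD] at h0 ⊢
      simp [h0]
    · rw [if_neg (by omega), pv_sum_take_succ]
      ring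

-- B-side fold facts: length and first-entry-zero of the last row
theorem pv_B_len (rows : List (List Int)) (N : Nat) :
    ∀ init : List (List Int),
    (rows.foldl (fun dp row => dp ++ [pvRowB (dp.getLastD []) row N]) init).length
      = init.length + rows.length := by
  induction rows with
  | nil => intro init; simp
  | cons r rows ih =>
    intro init
    rw [List.foldl_cons, ih]
    simp
    omega

theorem pv_B_head0 (rows : List (List Int)) (N : Nat) :
    ∀ init : List (List Int), (init.getLastD []).getD 0 0 = 0 →
    ((rows.foldl (fun dp row => dp ++ [pvRowB (dp.getLastD []) row N]) init).getLastD []).getD 0 0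
      = 0 := by
  induction rows with
  | nil => intro init h; exact h
  | cons r rows ih =>
    intro init h
    rw [List.foldl_cons]
    apply ih
    rw [List.getLastD_concat, pv_rowB_eq]
    simp [pvRowSpec]

theorem pv_getLastD_eq_getD (l : List (List Int)) :
    l.getLastD [] = l.getD (l.length - 1) [] := by
  rw [List.getLastD_eq_getLast?, List.getLast?_eq_getElem?]
  rfl

theorem pv_main (matrix : List (List Int)) (N : Nat) :
    ∀ t, t ≤ matrix.length →
    ((List.range' 1 t).foldl (fun dp i =>
        (List.range' 1 N).foldl (fun dp j =>
          pvSet2 dp i j (pvGet2 dp (i-1) j + pvGet2 dp i (j-1) - pvGet2 dp (i-1) (j-1)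
            + pvGet2 matrix (i-1) (j-1))) dp)
      (List.replicate (matrix.length+1) (List.replicate (N+1) (0:Int))))
    = ((matrix.take t).foldl (fun dp row => dp ++ [pvRowB (dp.getLastD []) row N])
        [List.replicate (N+1) (0:Int)])
      ++ List.replicate (matrix.length - t) (List.replicate (N+1) (0:Int)) := by
  intro t
  induction t with
  | zero => intro _; simp [List.replicate_succ]
  | succ t ih =>
    intro ht
    have ht' : t ≤ matrix.length := by omega
    rw [List.range'_concat, List.foldl_append, ih ht']
    have hj : 1 + 1 * t = t + 1 := by omega
    simp only [List.foldl_cons, List.foldl_nil, hj]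
    set Bt := ((matrix.take t).foldl
      (fun dp row => dp ++ [pvRowB (dp.getLastD []) row N])
      [List.replicate (N+1) (0:Int)]) with hBt
    have hlen : Bt.length = t + 1 := by
      rw [hBt, pv_B_len]
      simp only [List.length_cons, List.length_nil, List.length_take]
      omega
    set dp := Bt ++ List.replicate (matrix.length - t) (List.replicate (N+1) (0:Int)) with hdp
    have hdplen : dp.length = matrix.length + 1 := by
      rw [hdp]; simp [hlen]; omega
    have hrep : matrix.length - t = (matrix.length - (t+1)) + 1 := by omega
    have hprev : dp.getD ((t+1)-1) [] = Bt.getLastD [] := by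
      rw [hdp, Nat.add_sub_cancel, List.getD_append _ _ _ _ (by omega),
        pv_getLastD_eq_getD, hlen, Nat.add_sub_cancel]
    have hcur : dp.getD (t+1) [] = List.replicate (N+1) (0:Int) := by
      rw [hdp]
      have := List.getD_append_right Bt
        (List.replicate (matrix.length - t) (List.replicate (N+1) (0:Int)))
        ([]) (t+1) (by omega)
      rw [this, hlen, Nat.sub_self, hrep, List.replicate_succ, List.getD_cons_zero]
    have h0 : (Bt.getLastD []).getD 0 0 = 0 := by
      rw [hBt]; exact pv_B_head0 _ N _ (by simp)
    rw [pv_inner_eq matrix (List.range' 1 N) dp (t+1) (by omega) (by omega),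
      hprev, hcur, pv_rowA_eq _ _ N N (le_refl N) h0]
    simp only [Nat.sub_self, List.replicate_zero, List.append_nil]
    have htake : matrix.take (t+1) = matrix.take t ++ [matrix.getD t []] := by
      rw [List.take_add_one]
      congr 1
      have : matrix[t]? = some matrix[t] := List.getElem?_eq_getElem (by omega)
      simp [this, List.getD]
    rw [htake, List.foldl_append, ← hBt]
    simp only [List.foldl_cons, List.foldl_nil]
    rw [hdp, List.set_append_right _ _ (by omega), hlen, Nat.sub_self, hrep,
      List.replicate_succ, List.set_cons_zero, pv_rowB_eq, pvRowSpec,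
      List.append_assoc, List.singleton_append, Nat.add_sub_cancel]

theorem build_py_spec : Claim_equal_build_py := by
  intro matrix _ _
  unfold Spec_build_py build_py build_py_alt
  by_cases h : matrix = [] ∨ matrix.headD [] = []
  · rw [if_pos h, if_pos h]
  · rw [if_neg h, if_neg h]
    have := pv_main matrix ((matrix.headD []).length) matrix.length (le_refl _)
    simp only [List.take_length, Nat.sub_self, List.replicate_zero, List.append_nil] at this
    simp only [this]
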